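-- pv_equiv track=rewrite | github.com/kaikkjp/alive-memory | prompt/budget.py | _split_header_items
-- ===== SOURCE A (Python) =====
-- def _split_header_items(lines: list[str]) -> tuple[list[str], list[str]]:
--     """Split lines into preserved header lines and droppable item lines.
--
--     Header = leading empty lines + first non-indented, non-empty line.
--     Items = everything after the header.
--     Handles sections that start with '\\n' (leading empty line before header text).
--     """
--     header = []
--     items_start = 0
--     for i, line in enumerate(lines):
--         if not line.strip():
--             # Empty/whitespace-only line — part of header prefix
--             header.append(line)
--             items_start = i + 1
--         elif not line.startswith('  '):
--             # Non-indented, non-empty line — this IS the header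
--             header.append(line)
--             items_start = i + 1
--             break
--         else:
--             # Indented line before any header — no header detected
--             break
--     items = lines[items_start:]
--     return header, items
-- ===== SOURCE B (Python) =====
-- def _split_header_items(lines: list[str]) -> tuple[list[str], list[str]]:
--     """Find the boundary index, then slice — no accumulation loop."""
--     idx = next((i for i, line in enumerate(lines) if line.strip()), None)
--     if idx is None:
--         return list(lines), []
--     if lines[idx].startswith('  '):
--         return lines[:idx], lines[idx:]
--     return lines[:idx + 1], lines[idx + 1:]
-- ===== Notes on version B (the rewrite author's own statement) =====
-- stated objective: simpler
-- what changed: Replaces the incremental header-accumulation loop with finding the first non-blank line's index and returning two conditional slices of the input.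
import Mathlib
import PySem

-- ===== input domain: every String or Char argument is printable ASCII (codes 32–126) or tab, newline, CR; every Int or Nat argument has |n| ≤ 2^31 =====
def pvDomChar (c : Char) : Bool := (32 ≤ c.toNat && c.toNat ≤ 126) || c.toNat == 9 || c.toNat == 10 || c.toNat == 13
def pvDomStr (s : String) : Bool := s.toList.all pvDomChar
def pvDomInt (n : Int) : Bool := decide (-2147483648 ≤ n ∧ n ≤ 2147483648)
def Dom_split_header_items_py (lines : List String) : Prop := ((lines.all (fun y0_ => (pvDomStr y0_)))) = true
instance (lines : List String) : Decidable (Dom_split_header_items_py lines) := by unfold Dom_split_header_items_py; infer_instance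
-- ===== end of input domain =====

-- B finds the first non-blank line's index and slices, instead of A's accumulation loop: simpler decomposition, same O(n) cost.

-- ===== PORT A =====
-- the for-loop of A: state = (header, items_start); returns at the first break / end of list
def pvALoop : List String → Nat → List String → Nat → List String × Nat
  | [], _, header, s => (header, s)
  | l :: rest, i, header, s =>
    if PySem.Str.strip l = "" then pvALoop rest (i + 1) (header ++ [l]) (i + 1)
    else if PySem.Str.startswith l "  " = false then (header ++ [l], i + 1)
    else (header, s)

def split_header_items_py (lines : List String) : List String × List String :=
  let r := pvALoop lines 0 [] 0
  (r.1, PySem.List.slice lines (some (r.2 : Int)) none)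

-- ===== PORT B =====
-- next((i for i, line in enumerate(lines) if line.strip()), None)
def pvBFind : List String → Nat → Option Nat
  | [], _ => none
  | l :: rest, i => if PySem.Str.strip l = "" then pvBFind rest (i + 1) else some i

def split_header_items_py_alt (lines : List String) : List String × List String :=
  match pvBFind lines 0 with
  | none => (lines, [])
  | some idx =>
    if PySem.Str.startswith (lines.getD idx "") "  " then
      (PySem.List.slice lines none (some (idx : Int)),
       PySem.List.slice lines (some (idx : Int)) none)
    else
      (PySem.List.slice lines none (some ((idx : Int) + 1)),
       PySem.List.slice lines (some ((idx : Int) + 1)) none)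

-- ===== PRECONDITION & SPEC =====
def Spec_split_header_items_py (lines : List String) (out : List String × List String) : Prop := out = split_header_items_py_alt lines
instance (lines : List String) (out : List String × List String) : Decidable (Spec_split_header_items_py lines out) := by unfold Spec_split_header_items_py; infer_instance

-- ===== CLAIM (what is proved, stated in full; the proofs are below) =====
def Claim_equal_split_header_items_py : Prop := ∀ (lines : List String), Dom_split_header_items_py lines → Spec_split_header_items_py lines (split_header_items_py lines)

-- ===== LEMMAS AND PROOFS =====

lemma pvBFind_shift (xs : List String) : ∀ i : Nat,
    pvBFind xs (i + 1) = (pvBFind xs i).map (· + 1) := by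
  induction xs with
  | nil => intro i; simp [pvBFind]
  | cons l rest ih =>
    intro i
    by_cases h : PySem.Str.strip l = "" <;> simp [pvBFind, h, ih]

lemma pvALoop_eq (rest : List String) : ∀ (i : Nat) (acc : List String),
    pvALoop rest i acc i =
      match pvBFind rest 0 with
      | none => (acc ++ rest, i + rest.length)
      | some j =>
        if PySem.Str.startswith (rest.getD j "") "  " then (acc ++ rest.take j, i + j)
        else (acc ++ rest.take (j + 1), i + j + 1) := by
  induction rest with
  | nil => intro i acc; simp [pvALoop, pvBFind]
  | cons l rest' ih =>
    intro i acc
    by_cases hs : PySem.Str.strip l = ""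
    · have hb : pvBFind (l :: rest') 0 = (pvBFind rest' 0).map (· + 1) := by
        simp [pvBFind, hs, pvBFind_shift rest' 0]
      rw [show pvALoop (l :: rest') i acc i
            = pvALoop rest' (i + 1) (acc ++ [l]) (i + 1) by simp [pvALoop, hs],
          ih (i + 1) (acc ++ [l]), hb]
      cases pvBFind rest' 0 with
      | none => simp; omega
      | some j =>
        simp only [Option.map_some]
        simp [List.getD, List.take_succ_cons]
        split_ifs <;> exact congrArg (Prod.mk _) (by omega)
    · have hb : pvBFind (l :: rest') 0 = some 0 := by simp [pvBFind, hs]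
      rw [hb]
      by_cases hw : PySem.Chars.startswith l.toList [' ', ' '] = true <;>
        simp [pvALoop, hs, hw, List.getD]

theorem split_header_items_py_spec : Claim_equal_split_header_items_py := by
  intro lines _
  unfold Spec_split_header_items_py split_header_items_py split_header_items_py_alt
  rw [pvALoop_eq lines 0 []]
  cases hb : pvBFind lines 0 with
  | none =>
    simp [PySem.List.slice_from_natCast]
  | some j =>
    have hc1 : PySem.List.slice lines (some ((j : Int) + 1)) none = lines.drop (j + 1) := by
      rw [show ((j : Int) + 1) = ((j + 1 : Nat) : Int) by push_cast; ring,
          PySem.List.slice_from_natCast]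
    have hc2 : PySem.List.slice lines none (some ((j : Int) + 1)) = lines.take (j + 1) := by
      rw [show ((j : Int) + 1) = ((j + 1 : Nat) : Int) by push_cast; ring,
          PySem.List.slice_to_natCast]
    simp only [List.getD, hc1, hc2, PySem.List.slice_from_natCast, PySem.List.slice_to_natCast]
    by_cases hw : PySem.Chars.startswith (lines[j]?.getD "").toList [' ', ' '] = true <;>
      simp [hw]
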